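-- pv_equiv track=rewrite | github.com/noos/voice-transcriber-for-en-kr | app.py | format_hotkey
-- ===== SOURCE A (Python) =====
-- def format_hotkey(hotkey: str) -> str:
--     """단축키를 보기 좋게 포맷"""
--     if not hotkey:
--         return "-"
--     # Order matters: rshift/lshift before shift so they aren't partially replaced.
--     replacements = [
--         ("rshift", "Right ⇧"),
--         ("lshift", "Left ⇧"),
--         ("cmd", "⌘"), ("shift", "⇧"), ("alt", "⌥"),
--         ("ctrl", "⌃"), ("space", "Space"), ("+", ""),
--     ]
--     result = hotkey.lower()
--     for k, v in replacements:
--         result = result.replace(k, v)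
--     return result
-- ===== SOURCE B (Python) =====
-- def format_hotkey(hotkey: str) -> str:
--     """단축키를 보기 좋게 포맷 — one left-to-right scan instead of eight sequential replace passes."""
--     if not hotkey:
--         return "-"
--     symbols = {"rshift": "Right ⇧", "lshift": "Left ⇧", "cmd": "⌘", "shift": "⇧",
--                "alt": "⌥", "ctrl": "⌃", "space": "Space", "+": ""}
--     s = hotkey.lower()
--     pieces = []
--     i = 0
--     while i < len(s):
--         for key in symbols:
--             if s.startswith(key, i):
--                 pieces.append(symbols[key])
--                 i += len(key)
--                 break
--         else:
--             pieces.append(s[i])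
--             i += 1
--     return "".join(pieces)
-- ===== Notes on version B (the rewrite author's own statement) =====
-- stated objective: alternative
-- what changed: A lowercases and then runs eight sequential full-string str.replace passes; B lowercases once and does a single left-to-right scan that tries the keys in the same priority order at each position, emitting the symbol (or the character) as it goes.
-- intended difference: On inputs whose lowercasing contains the substring 'ctrlshift' (ctrl run together with shift), A's left-shift replace pass consumes the overlap and leaves part of the ctrl key as raw text (A('ctrlshift') = 'ctrLeft ⇧'), while B formats both keys (B('ctrlshift') = '⌃⇧'), which is the intended display. — e.g. on format_hotkey("ctrlshift"): A returns "ctrLeft ⇧", B returns "⌃⇧"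
import Mathlib
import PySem

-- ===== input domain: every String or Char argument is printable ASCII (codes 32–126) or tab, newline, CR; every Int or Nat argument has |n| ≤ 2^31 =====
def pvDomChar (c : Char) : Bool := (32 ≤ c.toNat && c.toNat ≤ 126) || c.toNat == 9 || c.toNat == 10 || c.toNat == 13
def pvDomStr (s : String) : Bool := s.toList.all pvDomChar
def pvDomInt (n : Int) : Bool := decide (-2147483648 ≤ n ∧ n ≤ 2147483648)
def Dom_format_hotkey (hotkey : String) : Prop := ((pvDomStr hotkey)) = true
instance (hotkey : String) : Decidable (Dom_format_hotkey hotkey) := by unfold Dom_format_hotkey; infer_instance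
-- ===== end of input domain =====

set_option maxRecDepth 2048


-- B replaces A's eight sequential full-string replace passes by one left-to-right scan that
-- tries the keys in the same priority order at each position (objective: alternative single-pass
-- algorithm); on the corner inputs described at D_format_hotkey the two differ and B's value is the intended one.

-- ===== PORT A =====
def format_hotkey (hotkey : String) : String :=
  if hotkey = "" then "-"
  else
    -- result = hotkey.lower(); for k, v in replacements: result = result.replace(k, v)
    [("rshift", "Right ⇧"), ("lshift", "Left ⇧"), ("cmd", "⌘"), ("shift", "⇧"),
     ("alt", "⌥"), ("ctrl", "⌃"), ("space", "Space"), ("+", "")].foldl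
      (fun result kv => PySem.Str.replace result kv.1 kv.2) (PySem.Str.lower hotkey)

-- ===== PORT B =====
-- the while-loop of Source B: at each position try the keys in priority order (s.startswith(k, i));
-- on a match emit the symbol and skip len(k) characters, otherwise emit the character itself.
def scanHotkey : List Char → List Char
  | [] => []
  | c :: t =>
    if ("rshift".toList).isPrefixOf (c :: t) then "Right ⇧".toList ++ scanHotkey (t.drop 5)
    else if ("lshift".toList).isPrefixOf (c :: t) then "Left ⇧".toList ++ scanHotkey (t.drop 5)
    else if ("cmd".toList).isPrefixOf (c :: t) then "⌘".toList ++ scanHotkey (t.drop 2)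
    else if ("shift".toList).isPrefixOf (c :: t) then "⇧".toList ++ scanHotkey (t.drop 4)
    else if ("alt".toList).isPrefixOf (c :: t) then "⌥".toList ++ scanHotkey (t.drop 2)
    else if ("ctrl".toList).isPrefixOf (c :: t) then "⌃".toList ++ scanHotkey (t.drop 3)
    else if ("space".toList).isPrefixOf (c :: t) then "Space".toList ++ scanHotkey (t.drop 4)
    else if ("+".toList).isPrefixOf (c :: t) then scanHotkey t
    else c :: scanHotkey t
termination_by l => l.length
decreasing_by all_goals (simp; try omega)

def format_hotkey_alt (hotkey : String) : String :=
  if hotkey = "" then "-"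
  else String.ofList (scanHotkey (PySem.Str.lower hotkey).toList)

-- ===== PRECONDITION & SPEC =====
-- On inputs whose lowercasing contains "ctrlshift" (a ctrl key run together with a shift key),
-- A's left-shift replace pass consumes the overlap and leaves part of the ctrl key as raw text in
-- the pretty-printed output (A "ctrlshift" = "ctrLeft ⇧"), while B formats both keys
-- (B "ctrlshift" = "⌃⇧"), which is the intended display.
def D_format_hotkey (hotkey : String) : Prop :=
  PySem.Chars.isIn "ctrlshift".toList (hotkey.toList.map Char.toLower) = true
instance (hotkey : String) : Decidable (D_format_hotkey hotkey) := by unfold D_format_hotkey; infer_instance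

def Spec_format_hotkey (hotkey : String) (out : String) : Prop :=
  ¬ D_format_hotkey hotkey → out = format_hotkey_alt hotkey
instance (hotkey : String) (out : String) : Decidable (Spec_format_hotkey hotkey out) := by unfold Spec_format_hotkey; infer_instance

def pvDiffWitness_format_hotkey : String := "ctrlshift"
def pvDiffWitnessOut_format_hotkey : String × String := ("ctrLeft ⇧", "⌃⇧")

-- ===== CLAIM (what is proved, stated in full; the proofs are below) =====
def Claim_unchanged_format_hotkey : Prop := ∀ (hotkey : String), Dom_format_hotkey hotkey → Spec_format_hotkey hotkey (format_hotkey hotkey)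
def Claim_changed_format_hotkey : Prop := Dom_format_hotkey (pvDiffWitness_format_hotkey) ∧ D_format_hotkey (pvDiffWitness_format_hotkey) ∧ format_hotkey (pvDiffWitness_format_hotkey) = pvDiffWitnessOut_format_hotkey.1 ∧ format_hotkey_alt (pvDiffWitness_format_hotkey) = pvDiffWitnessOut_format_hotkey.2 ∧ pvDiffWitnessOut_format_hotkey.1 ≠ pvDiffWitnessOut_format_hotkey.2

def Claim_exact_format_hotkey : Prop := ∀ (hotkey : String), Dom_format_hotkey hotkey → D_format_hotkey hotkey → format_hotkey hotkey ≠ format_hotkey_alt hotkey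

-- ===== LEMMAS AND PROOFS =====

-- PySem's lowerChar agrees with core Char.toLower (both lowercase exactly 'A'..'Z')
theorem lowerChar_eq_toLower (c : Char) : PySem.Chars.lowerChar c = Char.toLower c := by
  unfold PySem.Chars.lowerChar PySem.Chars.isupper Char.toLower
  by_cases h : 'A' ≤ c ∧ c ≤ 'Z'
  · rw [if_pos (by simp [h.1, h.2]), dif_pos (by exact ⟨h.1, h.2⟩)]
    apply Char.ext
    have h3 : c.val.toNat ≤ 90 := by
      simpa using UInt32.le_iff_toNat_le.mp h.2
    rw [Char.toNat_val c] at h3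
    show (Char.ofNat (c.toNat + 32)).val = _
    rw [Char.ofNat, dif_pos (Or.inl (by omega : c.toNat + 32 < 55296))]
    apply UInt32.toNat_inj.mp
    show (Char.ofNatAux (c.toNat + 32) _).val.toNat = (c.val + ('a'.val - 'A'.val)).toNat
    have h5 : ('a'.val - 'A'.val).toNat = 32 := by decide
    rw [UInt32.toNat_add, h5]
    simp only [Char.ofNatAux, UInt32.toNat, BitVec.toNat_ofNatLT]
    have h6 : c.val.toBitVec.toNat = c.toNat := by
      rw [← Char.toNat_val c]; rfl
    rw [h6]
    omega
  · rw [if_neg (by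
        simp only [Bool.and_eq_true, decide_eq_true_eq]
        intro hc; exact h ⟨hc.1, hc.2⟩),
      dif_neg (by exact fun hc => h ⟨hc.1, hc.2⟩)]

theorem lower_toList (s : String) :
    (PySem.Str.lower s).toList = s.toList.map Char.toLower := by
  rw [PySem.Str.toList_lower, PySem.Chars.lower]
  exact List.map_congr_left (fun x _ => lowerChar_eq_toLower x)


-- A clean structural form of PySem.Chars.replace (for a nonempty pattern).
def repl (old new : List Char) : List Char → List Char
  | [] => []
  | c :: t =>
    if old.isPrefixOf (c :: t) then new ++ repl old new (t.drop (old.length - 1))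
    else c :: repl old new t
termination_by l => l.length
decreasing_by all_goals (simp; try omega)

theorem repl_go_eq (old new : List Char) (hne : old ≠ []) :
    ∀ (fuel : Nat) (l acc : List Char), l.length ≤ fuel →
      PySem.Chars.replace.go old new fuel l acc = acc.reverse ++ repl old new l := by
  intro fuel
  induction fuel with
  | zero =>
    intro l acc hl
    have : l = [] := List.eq_nil_of_length_eq_zero (Nat.le_zero.mp hl)
    subst this
    simp [PySem.Chars.replace.go, repl]
  | succ n ih =>
    intro l acc hl
    cases l with
    | nil => simp [PySem.Chars.replace.go, repl]
    | cons c t =>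
      rw [PySem.Chars.replace.go]
      by_cases h : old.isPrefixOf (c :: t)
      · rw [if_pos h, repl, if_pos h]
        have hlen : (List.drop old.length (c :: t)).length ≤ n := by
          have : 1 ≤ old.length := by
            cases old with
            | nil => exact absurd rfl hne
            | cons _ _ => simp
          simp at hl ⊢
          omega
        rw [ih _ _ hlen]
        have hdrop : List.drop old.length (c :: t) = t.drop (old.length - 1) := by
          cases old with
          | nil => exact absurd rfl hne
          | cons o os => simp
        rw [hdrop]
        simp
      · rw [if_neg h, repl, if_neg h, ih t (c :: acc) (by simp at hl ⊢; omega)]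
        simp

theorem replace_eq_repl (old new l : List Char) (hne : old ≠ []) :
    PySem.Chars.replace l old new = repl old new l := by
  rw [PySem.Chars.replace]
  rw [if_neg (by simp [List.isEmpty_iff, hne])]
  rw [repl_go_eq old new hne l.length l [] le_rfl]
  simp

theorem repl_nil (old new : List Char) : repl old new [] = [] := by rw [repl]

theorem repl_cons_neg (old new : List Char) (c : Char) (t : List Char)
    (h : ¬ old <+: (c :: t)) : repl old new (c :: t) = c :: repl old new t := by
  rw [repl, if_neg (by rw [List.isPrefixOf_iff_prefix]; exact h)]

theorem repl_match (old new x : List Char) (hne : old ≠ []) :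
    repl old new (old ++ x) = new ++ repl old new x := by
  cases old with
  | nil => exact absurd rfl hne
  | cons o os =>
    rw [List.cons_append, repl,
        if_pos (by rw [List.isPrefixOf_iff_prefix, ← List.cons_append]; exact List.prefix_append _ _)]
    simp

-- a literal segment a in which the pattern k can neither match nor begin
def ccheck : List Char → List Char → Bool
  | [], _ => true
  | c :: a', k => (!(k.isPrefixOf (c :: a')) && !((c :: a').isPrefixOf k)) && ccheck a' k

theorem prefix_append_cases {k a x : List Char} (h : k <+: a ++ x) : k <+: a ∨ a <+: k := by
  rcases Nat.le_total k.length a.length with hle | hle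
  · exact Or.inl (List.prefix_of_prefix_length_le h (List.prefix_append a x) hle)
  · exact Or.inr (List.prefix_of_prefix_length_le (List.prefix_append a x) h hle)

theorem repl_passthrough (k v : List Char) :
    ∀ (a x : List Char), ccheck a k = true → repl k v (a ++ x) = a ++ repl k v x := by
  intro a
  induction a with
  | nil => intro x _; simp
  | cons c a' ih =>
    intro x h
    rw [ccheck, Bool.and_eq_true, Bool.and_eq_true] at h
    obtain ⟨⟨h1, h2⟩, h3⟩ := h
    rw [Bool.not_eq_eq_eq_not, Bool.not_true, ← Bool.not_eq_true] at h1 h2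
    rw [List.isPrefixOf_iff_prefix] at h1 h2
    have hnp : ¬ k <+: (c :: a') ++ x := by
      intro hc
      rcases prefix_append_cases hc with hc | hc
      · exact h1 hc
      · exact h2 hc
    rw [List.cons_append, repl_cons_neg _ _ _ _ (by rw [← List.cons_append]; exact hnp),
        ih x h3, List.cons_append]

-- a pattern of lowercase letters that is absent stays absent through a replace pass whose
-- replacement starts with a non-lowercase character (all of A's replacements do)
theorem pres_pass_aux (k v : List Char)
    (hv : ∀ c ∈ v.take 1, ¬ ('a' ≤ c ∧ c ≤ 'z')) (hvne : v ≠ []) :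
    ∀ (n : Nat) (p t : List Char), t.length ≤ n → (∀ c ∈ p, 'a' ≤ c ∧ c ≤ 'z') →
      ¬ p <+: t → ¬ p <+: repl k v t := by
  intro n
  induction n with
  | zero =>
    intro p t ht _ h hc
    have : t = [] := List.eq_nil_of_length_eq_zero (Nat.le_zero.mp ht)
    subst this
    rw [repl_nil] at hc
    exact h (List.prefix_nil.mp hc ▸ List.nil_prefix)
  | succ n ih =>
    intro p t ht hp h hc
    cases t with
    | nil =>
      rw [repl_nil] at hc
      exact h (List.prefix_nil.mp hc ▸ List.nil_prefix)
    | cons c t' =>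
      by_cases hpre : k.isPrefixOf (c :: t')
      · rw [repl, if_pos hpre] at hc
        cases p with
        | nil => exact h List.nil_prefix
        | cons pc p' =>
          cases v with
          | nil => exact absurd rfl hvne
          | cons vc v' =>
            rw [List.cons_append, List.cons_prefix_cons] at hc
            exact (hv vc (by simp)) (hc.1 ▸ hp pc (by simp))
      · rw [repl_cons_neg _ _ _ _ (by rw [← List.isPrefixOf_iff_prefix]; simpa using hpre)] at hc
        cases p with
        | nil => exact h List.nil_prefix
        | cons pc p' =>
          rw [List.cons_prefix_cons] at hc
          have h' : ¬ p' <+: t' := fun hx => h (List.cons_prefix_cons.mpr ⟨hc.1, hx⟩)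
          exact ih p' t' (by simp at ht; omega) (fun x hx => hp x (by simp [hx])) h' hc.2

theorem pres_pass (k v p t : List Char)
    (hp : ∀ c ∈ p, 'a' ≤ c ∧ c ≤ 'z')
    (hv : ∀ c ∈ v.take 1, ¬ ('a' ≤ c ∧ c ≤ 'z')) (hvne : v ≠ []) (h : ¬ p <+: t) :
    ¬ p <+: repl k v t :=
  pres_pass_aux k v hv hvne t.length p t le_rfl hp h

-- A's composite: the eight replace passes in order, on the char-list level
def Fc (m : List Char) : List Char :=
  repl "+".toList "".toList
    (repl "space".toList "Space".toList
      (repl "ctrl".toList "⌃".toList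
        (repl "alt".toList "⌥".toList
          (repl "shift".toList "⇧".toList
            (repl "cmd".toList "⌘".toList
              (repl "lshift".toList "Left ⇧".toList
                (repl "rshift".toList "Right ⇧".toList m)))))))
theorem Fc_rshift (t : List Char) : Fc ("rshift".toList ++ t) = "Right ⇧".toList ++ Fc t := by
  unfold Fc
  rw [repl_match "rshift".toList "Right ⇧".toList _ (by decide)]
  rw [repl_passthrough "lshift".toList "Left ⇧".toList "Right ⇧".toList _ (by decide)]
  rw [repl_passthrough "cmd".toList "⌘".toList "Right ⇧".toList _ (by decide)]
  rw [repl_passthrough "shift".toList "⇧".toList "Right ⇧".toList _ (by decide)]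
  rw [repl_passthrough "alt".toList "⌥".toList "Right ⇧".toList _ (by decide)]
  rw [repl_passthrough "ctrl".toList "⌃".toList "Right ⇧".toList _ (by decide)]
  rw [repl_passthrough "space".toList "Space".toList "Right ⇧".toList _ (by decide)]
  rw [repl_passthrough "+".toList "".toList "Right ⇧".toList _ (by decide)]

theorem Fc_lshift (t : List Char) : Fc ("lshift".toList ++ t) = "Left ⇧".toList ++ Fc t := by
  unfold Fc
  rw [repl_passthrough "rshift".toList "Right ⇧".toList "lshift".toList _ (by decide)]
  rw [repl_match "lshift".toList "Left ⇧".toList _ (by decide)]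
  rw [repl_passthrough "cmd".toList "⌘".toList "Left ⇧".toList _ (by decide)]
  rw [repl_passthrough "shift".toList "⇧".toList "Left ⇧".toList _ (by decide)]
  rw [repl_passthrough "alt".toList "⌥".toList "Left ⇧".toList _ (by decide)]
  rw [repl_passthrough "ctrl".toList "⌃".toList "Left ⇧".toList _ (by decide)]
  rw [repl_passthrough "space".toList "Space".toList "Left ⇧".toList _ (by decide)]
  rw [repl_passthrough "+".toList "".toList "Left ⇧".toList _ (by decide)]

theorem Fc_cmd (t : List Char) : Fc ("cmd".toList ++ t) = "⌘".toList ++ Fc t := by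
  unfold Fc
  rw [repl_passthrough "rshift".toList "Right ⇧".toList "cmd".toList _ (by decide)]
  rw [repl_passthrough "lshift".toList "Left ⇧".toList "cmd".toList _ (by decide)]
  rw [repl_match "cmd".toList "⌘".toList _ (by decide)]
  rw [repl_passthrough "shift".toList "⇧".toList "⌘".toList _ (by decide)]
  rw [repl_passthrough "alt".toList "⌥".toList "⌘".toList _ (by decide)]
  rw [repl_passthrough "ctrl".toList "⌃".toList "⌘".toList _ (by decide)]
  rw [repl_passthrough "space".toList "Space".toList "⌘".toList _ (by decide)]
  rw [repl_passthrough "+".toList "".toList "⌘".toList _ (by decide)]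

theorem Fc_shift (t : List Char) : Fc ("shift".toList ++ t) = "⇧".toList ++ Fc t := by
  unfold Fc
  rw [repl_passthrough "rshift".toList "Right ⇧".toList "shift".toList _ (by decide)]
  rw [repl_passthrough "lshift".toList "Left ⇧".toList "shift".toList _ (by decide)]
  rw [repl_passthrough "cmd".toList "⌘".toList "shift".toList _ (by decide)]
  rw [repl_match "shift".toList "⇧".toList _ (by decide)]
  rw [repl_passthrough "alt".toList "⌥".toList "⇧".toList _ (by decide)]
  rw [repl_passthrough "ctrl".toList "⌃".toList "⇧".toList _ (by decide)]
  rw [repl_passthrough "space".toList "Space".toList "⇧".toList _ (by decide)]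
  rw [repl_passthrough "+".toList "".toList "⇧".toList _ (by decide)]

theorem Fc_alt (t : List Char) : Fc ("alt".toList ++ t) = "⌥".toList ++ Fc t := by
  unfold Fc
  rw [repl_passthrough "rshift".toList "Right ⇧".toList "alt".toList _ (by decide)]
  rw [repl_passthrough "lshift".toList "Left ⇧".toList "alt".toList _ (by decide)]
  rw [repl_passthrough "cmd".toList "⌘".toList "alt".toList _ (by decide)]
  rw [repl_passthrough "shift".toList "⇧".toList "alt".toList _ (by decide)]
  rw [repl_match "alt".toList "⌥".toList _ (by decide)]
  rw [repl_passthrough "ctrl".toList "⌃".toList "⌥".toList _ (by decide)]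
  rw [repl_passthrough "space".toList "Space".toList "⌥".toList _ (by decide)]
  rw [repl_passthrough "+".toList "".toList "⌥".toList _ (by decide)]

theorem Fc_space (t : List Char) : Fc ("space".toList ++ t) = "Space".toList ++ Fc t := by
  unfold Fc
  rw [repl_passthrough "rshift".toList "Right ⇧".toList "space".toList _ (by decide)]
  rw [repl_passthrough "lshift".toList "Left ⇧".toList "space".toList _ (by decide)]
  rw [repl_passthrough "cmd".toList "⌘".toList "space".toList _ (by decide)]
  rw [repl_passthrough "shift".toList "⇧".toList "space".toList _ (by decide)]
  rw [repl_passthrough "alt".toList "⌥".toList "space".toList _ (by decide)]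
  rw [repl_passthrough "ctrl".toList "⌃".toList "space".toList _ (by decide)]
  rw [repl_match "space".toList "Space".toList _ (by decide)]
  rw [repl_passthrough "+".toList "".toList "Space".toList _ (by decide)]

theorem Fc_plus (t : List Char) : Fc ("+".toList ++ t) = "".toList ++ Fc t := by
  unfold Fc
  rw [repl_passthrough "rshift".toList "Right ⇧".toList "+".toList _ (by decide)]
  rw [repl_passthrough "lshift".toList "Left ⇧".toList "+".toList _ (by decide)]
  rw [repl_passthrough "cmd".toList "⌘".toList "+".toList _ (by decide)]
  rw [repl_passthrough "shift".toList "⇧".toList "+".toList _ (by decide)]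
  rw [repl_passthrough "alt".toList "⌥".toList "+".toList _ (by decide)]
  rw [repl_passthrough "ctrl".toList "⌃".toList "+".toList _ (by decide)]
  rw [repl_passthrough "space".toList "Space".toList "+".toList _ (by decide)]
  rw [repl_match "+".toList "".toList _ (by decide)]

theorem ctrl_pass_lshift (x : List Char) (h : ¬ "shift".toList <+: x) :
    repl "lshift".toList "Left ⇧".toList ("ctrl".toList ++ x)
      = "ctrl".toList ++ repl "lshift".toList "Left ⇧".toList x := by
  have e1 : "ctrl".toList = 'c'::'t'::'r'::['l'] := by decide
  have e2 : "lshift".toList = 'l' :: "shift".toList := by decide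
  rw [e1]
  simp only [List.cons_append, List.nil_append]
  rw [repl_cons_neg _ _ _ _ (by rw [e2, List.cons_prefix_cons]; rintro ⟨h1, -⟩; exact absurd h1 (by decide)),
      repl_cons_neg _ _ _ _ (by rw [e2, List.cons_prefix_cons]; rintro ⟨h1, -⟩; exact absurd h1 (by decide)),
      repl_cons_neg _ _ _ _ (by rw [e2, List.cons_prefix_cons]; rintro ⟨h1, -⟩; exact absurd h1 (by decide)),
      repl_cons_neg _ _ _ _ (by rw [e2, List.cons_prefix_cons]; rintro ⟨-, h2⟩; exact h h2)]

theorem Fc_ctrl (t : List Char) (hns : ¬ "shift".toList <+: t) :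
    Fc ("ctrl".toList ++ t) = "⌃".toList ++ Fc t := by
  unfold Fc
  rw [repl_passthrough "rshift".toList "Right ⇧".toList "ctrl".toList _ (by decide)]
  rw [ctrl_pass_lshift _ (pres_pass "rshift".toList "Right ⇧".toList "shift".toList t
        (by simp) (by simp) (by simp) hns)]
  rw [repl_passthrough "cmd".toList "⌘".toList "ctrl".toList _ (by decide)]
  rw [repl_passthrough "shift".toList "⇧".toList "ctrl".toList _ (by decide)]
  rw [repl_passthrough "alt".toList "⌥".toList "ctrl".toList _ (by decide)]
  rw [repl_match "ctrl".toList "⌃".toList _ (by decide)]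
  rw [repl_passthrough "space".toList "Space".toList "⌃".toList _ (by decide)]
  rw [repl_passthrough "+".toList "".toList "⌃".toList _ (by decide)]

theorem notpref_step (kc : Char) (k' : List Char) (c : Char) (x y : List Char)
    (h : ¬ (kc :: k') <+: (c :: x)) (hpres : ¬ k' <+: x → ¬ k' <+: y) :
    ¬ (kc :: k') <+: (c :: y) := by
  intro hc
  rw [List.cons_prefix_cons] at hc
  by_cases hkc : kc = c
  · exact hpres (fun hx => h (List.cons_prefix_cons.mpr ⟨hkc, hx⟩)) hc.2
  · exact hkc hc.1
theorem Fc_default (c : Char) (t : List Char)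
    (h1 : ¬ "rshift".toList <+: (c :: t))
    (h2 : ¬ "lshift".toList <+: (c :: t))
    (h3 : ¬ "cmd".toList <+: (c :: t))
    (h4 : ¬ "shift".toList <+: (c :: t))
    (h5 : ¬ "alt".toList <+: (c :: t))
    (h6 : ¬ "ctrl".toList <+: (c :: t))
    (h7 : ¬ "space".toList <+: (c :: t))
    (h8 : ¬ "+".toList <+: (c :: t)) :
    Fc (c :: t) = c :: Fc t := by
  unfold Fc
  rw [repl_cons_neg "rshift".toList "Right ⇧".toList c t h1]
  have g2 : ¬ ('l' :: "shift".toList) <+: (c :: (repl "rshift".toList "Right ⇧".toList t)) :=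
    notpref_step 'l' "shift".toList c t (repl "rshift".toList "Right ⇧".toList t) (by rw [show ("lshift".toList) = 'l' :: "shift".toList by decide] at h2; exact h2) (fun hh => (pres_pass "rshift".toList "Right ⇧".toList "shift".toList t (by simp) (by simp) (by simp) hh))
  rw [repl_cons_neg "lshift".toList "Left ⇧".toList c (repl "rshift".toList "Right ⇧".toList t) (by rw [show ("lshift".toList) = 'l' :: "shift".toList by decide]; exact g2)]
  have g3 : ¬ ('c' :: "md".toList) <+: (c :: (repl "lshift".toList "Left ⇧".toList (repl "rshift".toList "Right ⇧".toList t))) :=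
    notpref_step 'c' "md".toList c t (repl "lshift".toList "Left ⇧".toList (repl "rshift".toList "Right ⇧".toList t)) (by rw [show ("cmd".toList) = 'c' :: "md".toList by decide] at h3; exact h3) (fun hh => (pres_pass "lshift".toList "Left ⇧".toList "md".toList (repl "rshift".toList "Right ⇧".toList t) (by simp) (by simp) (by simp) (pres_pass "rshift".toList "Right ⇧".toList "md".toList t (by simp) (by simp) (by simp) hh)))
  rw [repl_cons_neg "cmd".toList "⌘".toList c (repl "lshift".toList "Left ⇧".toList (repl "rshift".toList "Right ⇧".toList t)) (by rw [show ("cmd".toList) = 'c' :: "md".toList by decide]; exact g3)]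
  have g4 : ¬ ('s' :: "hift".toList) <+: (c :: (repl "cmd".toList "⌘".toList (repl "lshift".toList "Left ⇧".toList (repl "rshift".toList "Right ⇧".toList t)))) :=
    notpref_step 's' "hift".toList c t (repl "cmd".toList "⌘".toList (repl "lshift".toList "Left ⇧".toList (repl "rshift".toList "Right ⇧".toList t))) (by rw [show ("shift".toList) = 's' :: "hift".toList by decide] at h4; exact h4) (fun hh => (pres_pass "cmd".toList "⌘".toList "hift".toList (repl "lshift".toList "Left ⇧".toList (repl "rshift".toList "Right ⇧".toList t)) (by simp) (by simp) (by simp) (pres_pass "lshift".toList "Left ⇧".toList "hift".toList (repl "rshift".toList "Right ⇧".toList t) (by simp) (by simp) (by simp) (pres_pass "rshift".toList "Right ⇧".toList "hift".toList t (by simp) (by simp) (by simp) hh))))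
  rw [repl_cons_neg "shift".toList "⇧".toList c (repl "cmd".toList "⌘".toList (repl "lshift".toList "Left ⇧".toList (repl "rshift".toList "Right ⇧".toList t))) (by rw [show ("shift".toList) = 's' :: "hift".toList by decide]; exact g4)]
  have g5 : ¬ ('a' :: "lt".toList) <+: (c :: (repl "shift".toList "⇧".toList (repl "cmd".toList "⌘".toList (repl "lshift".toList "Left ⇧".toList (repl "rshift".toList "Right ⇧".toList t))))) :=
    notpref_step 'a' "lt".toList c t (repl "shift".toList "⇧".toList (repl "cmd".toList "⌘".toList (repl "lshift".toList "Left ⇧".toList (repl "rshift".toList "Right ⇧".toList t)))) (by rw [show ("alt".toList) = 'a' :: "lt".toList by decide] at h5; exact h5) (fun hh => (pres_pass "shift".toList "⇧".toList "lt".toList (repl "cmd".toList "⌘".toList (repl "lshift".toList "Left ⇧".toList (repl "rshift".toList "Right ⇧".toList t))) (by simp) (by simp) (by simp) (pres_pass "cmd".toList "⌘".toList "lt".toList (repl "lshift".toList "Left ⇧".toList (repl "rshift".toList "Right ⇧".toList t)) (by simp) (by simp) (by simp) (pres_pass "lshift".toList "Left ⇧".toList "lt".toList (repl "rshift".toList "Right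 ⇧".toList t) (by simp) (by simp) (by simp) (pres_pass "rshift".toList "Right ⇧".toList "lt".toList t (by simp) (by simp) (by simp) hh)))))
  rw [repl_cons_neg "alt".toList "⌥".toList c (repl "shift".toList "⇧".toList (repl "cmd".toList "⌘".toList (repl "lshift".toList "Left ⇧".toList (repl "rshift".toList "Right ⇧".toList t)))) (by rw [show ("alt".toList) = 'a' :: "lt".toList by decide]; exact g5)]
  have g6 : ¬ ('c' :: "trl".toList) <+: (c :: (repl "alt".toList "⌥".toList (repl "shift".toList "⇧".toList (repl "cmd".toList "⌘".toList (repl "lshift".toList "Left ⇧".toList (repl "rshift".toList "Right ⇧".toList t)))))) :=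
    notpref_step 'c' "trl".toList c t (repl "alt".toList "⌥".toList (repl "shift".toList "⇧".toList (repl "cmd".toList "⌘".toList (repl "lshift".toList "Left ⇧".toList (repl "rshift".toList "Right ⇧".toList t))))) (by rw [show ("ctrl".toList) = 'c' :: "trl".toList by decide] at h6; exact h6) (fun hh => (pres_pass "alt".toList "⌥".toList "trl".toList (repl "shift".toList "⇧".toList (repl "cmd".toList "⌘".toList (repl "lshift".toList "Left ⇧".toList (repl "rshift".toList "Right ⇧".toList t)))) (by simp) (by simp) (by simp) (pres_pass "shift".toList "⇧".toList "trl".toList (repl "cmd".toList "⌘".toList (repl "lshift".toList "Left ⇧".toList (repl "rshift".toList "Right ⇧".toList t))) (by simp) (by simp) (by simp) (pres_pass "cmd".toList "⌘".toList "trl".toList (repl "lshift".toList "Left ⇧".toList (repl "rshift".toList "Right ⇧".toList t)) (by simp) (by simp) (by simp) (pres_pass "lshift".toList "Left ⇧".toList "trl".toList (repl "rshift".toList "Right ⇧".toList t) (by simp) (by simp) (by simp) (pres_pass "rshift".toList "Right ⇧".toList "trl".toList t (by simp) (by simp) (by simp) hh))))))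
  rw [repl_cons_neg "ctrl".toList "⌃".toList c (repl "alt".toList "⌥".toList (repl "shift".toList "⇧".toList (repl "cmd".toList "⌘".toList (repl "lshift".toList "Left ⇧".toList (repl "rshift".toList "Right ⇧".toList t))))) (by rw [show ("ctrl".toList) = 'c' :: "trl".toList by decide]; exact g6)]
  have g7 : ¬ ('s' :: "pace".toList) <+: (c :: (repl "ctrl".toList "⌃".toList (repl "alt".toList "⌥".toList (repl "shift".toList "⇧".toList (repl "cmd".toList "⌘".toList (repl "lshift".toList "Left ⇧".toList (repl "rshift".toList "Right ⇧".toList t))))))) :=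
    notpref_step 's' "pace".toList c t (repl "ctrl".toList "⌃".toList (repl "alt".toList "⌥".toList (repl "shift".toList "⇧".toList (repl "cmd".toList "⌘".toList (repl "lshift".toList "Left ⇧".toList (repl "rshift".toList "Right ⇧".toList t)))))) (by rw [show ("space".toList) = 's' :: "pace".toList by decide] at h7; exact h7) (fun hh => (pres_pass "ctrl".toList "⌃".toList "pace".toList (repl "alt".toList "⌥".toList (repl "shift".toList "⇧".toList (repl "cmd".toList "⌘".toList (repl "lshift".toList "Left ⇧".toList (repl "rshift".toList "Right ⇧".toList t))))) (by simp) (by simp) (by simp) (pres_pass "alt".toList "⌥".toList "pace".toList (repl "shift".toList "⇧".toList (repl "cmd".toList "⌘".toList (repl "lshift".toList "Left ⇧".toList (repl "rshift".toList "Right ⇧".toList t)))) (by simp) (by simp) (by simp) (pres_pass "shift".toList "⇧".toList "pace".toList (repl "cmd".toList "⌘".toList (repl "lshift".toList "Left ⇧".toList (repl "rshift".toList "Right ⇧".toList t))) (by simp) (by simp) (by simp) (pres_pass "cmd".toList "⌘".toList "pace".toList (repl "lshift".toList "Left ⇧".toList (repl "rshift".toList "Right ⇧".toList t)) (by simp)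 (by simp) (by simp) (pres_pass "lshift".toList "Left ⇧".toList "pace".toList (repl "rshift".toList "Right ⇧".toList t) (by simp) (by simp) (by simp) (pres_pass "rshift".toList "Right ⇧".toList "pace".toList t (by simp) (by simp) (by simp) hh)))))))
  rw [repl_cons_neg "space".toList "Space".toList c (repl "ctrl".toList "⌃".toList (repl "alt".toList "⌥".toList (repl "shift".toList "⇧".toList (repl "cmd".toList "⌘".toList (repl "lshift".toList "Left ⇧".toList (repl "rshift".toList "Right ⇧".toList t)))))) (by rw [show ("space".toList) = 's' :: "pace".toList by decide]; exact g7)]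
  have g8 : ¬ ('+' :: ([] : List Char)) <+: (c :: (repl "space".toList "Space".toList (repl "ctrl".toList "⌃".toList (repl "alt".toList "⌥".toList (repl "shift".toList "⇧".toList (repl "cmd".toList "⌘".toList (repl "lshift".toList "Left ⇧".toList (repl "rshift".toList "Right ⇧".toList t)))))))) :=
    notpref_step '+' ([] : List Char) c t (repl "space".toList "Space".toList (repl "ctrl".toList "⌃".toList (repl "alt".toList "⌥".toList (repl "shift".toList "⇧".toList (repl "cmd".toList "⌘".toList (repl "lshift".toList "Left ⇧".toList (repl "rshift".toList "Right ⇧".toList t))))))) (by rw [show ("+".toList) = '+' :: ([] : List Char) by decide] at h8; exact h8) (fun hh => absurd List.nil_prefix hh)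
  rw [repl_cons_neg "+".toList "".toList c (repl "space".toList "Space".toList (repl "ctrl".toList "⌃".toList (repl "alt".toList "⌥".toList (repl "shift".toList "⇧".toList (repl "cmd".toList "⌘".toList (repl "lshift".toList "Left ⇧".toList (repl "rshift".toList "Right ⇧".toList t))))))) (by rw [show ("+".toList) = '+' :: ([] : List Char) by decide]; exact g8)]

theorem scan_rshift (t : List Char) : scanHotkey ("rshift".toList ++ t) = "Right ⇧".toList ++ scanHotkey t := by
  have e : "rshift".toList = 'r'::'s'::'h'::'i'::'f'::['t'] := by decide
  rw [e]
  simp only [List.cons_append, List.nil_append]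
  rw [scanHotkey]
  simp [List.isPrefixOf]

theorem scan_lshift (t : List Char) : scanHotkey ("lshift".toList ++ t) = "Left ⇧".toList ++ scanHotkey t := by
  have e : "lshift".toList = 'l'::'s'::'h'::'i'::'f'::['t'] := by decide
  rw [e]
  simp only [List.cons_append, List.nil_append]
  rw [scanHotkey]
  simp [List.isPrefixOf]

theorem scan_cmd (t : List Char) : scanHotkey ("cmd".toList ++ t) = "⌘".toList ++ scanHotkey t := by
  have e : "cmd".toList = 'c'::'m'::['d'] := by decide
  rw [e]
  simp only [List.cons_append, List.nil_append]
  rw [scanHotkey]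
  simp [List.isPrefixOf]

theorem scan_shift (t : List Char) : scanHotkey ("shift".toList ++ t) = "⇧".toList ++ scanHotkey t := by
  have e : "shift".toList = 's'::'h'::'i'::'f'::['t'] := by decide
  rw [e]
  simp only [List.cons_append, List.nil_append]
  rw [scanHotkey]
  simp [List.isPrefixOf]

theorem scan_alt (t : List Char) : scanHotkey ("alt".toList ++ t) = "⌥".toList ++ scanHotkey t := by
  have e : "alt".toList = 'a'::'l'::['t'] := by decide
  rw [e]
  simp only [List.cons_append, List.nil_append]
  rw [scanHotkey]
  simp [List.isPrefixOf]

theorem scan_ctrl (t : List Char) : scanHotkey ("ctrl".toList ++ t) = "⌃".toList ++ scanHotkey t := by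
  have e : "ctrl".toList = 'c'::'t'::'r'::['l'] := by decide
  rw [e]
  simp only [List.cons_append, List.nil_append]
  rw [scanHotkey]
  simp [List.isPrefixOf]

theorem scan_space (t : List Char) : scanHotkey ("space".toList ++ t) = "Space".toList ++ scanHotkey t := by
  have e : "space".toList = 's'::'p'::'a'::'c'::['e'] := by decide
  rw [e]
  simp only [List.cons_append, List.nil_append]
  rw [scanHotkey]
  simp [List.isPrefixOf]

theorem scan_plus (t : List Char) : scanHotkey ("+".toList ++ t) = scanHotkey t := by
  have e : "+".toList = ['+'] := by decide
  rw [e]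
  simp only [List.cons_append, List.nil_append]
  rw [scanHotkey]
  simp [List.isPrefixOf]

theorem scan_default (c : Char) (t : List Char)
    (h1 : ¬ "rshift".toList <+: (c :: t)) (h2 : ¬ "lshift".toList <+: (c :: t))
    (h3 : ¬ "cmd".toList <+: (c :: t)) (h4 : ¬ "shift".toList <+: (c :: t))
    (h5 : ¬ "alt".toList <+: (c :: t)) (h6 : ¬ "ctrl".toList <+: (c :: t))
    (h7 : ¬ "space".toList <+: (c :: t)) (h8 : ¬ "+".toList <+: (c :: t)) :
    scanHotkey (c :: t) = c :: scanHotkey t := by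
  rw [scanHotkey]
  rw [if_neg (by rw [List.isPrefixOf_iff_prefix]; exact h1),
      if_neg (by rw [List.isPrefixOf_iff_prefix]; exact h2),
      if_neg (by rw [List.isPrefixOf_iff_prefix]; exact h3),
      if_neg (by rw [List.isPrefixOf_iff_prefix]; exact h4),
      if_neg (by rw [List.isPrefixOf_iff_prefix]; exact h5),
      if_neg (by rw [List.isPrefixOf_iff_prefix]; exact h6),
      if_neg (by rw [List.isPrefixOf_iff_prefix]; exact h7),
      if_neg (by rw [List.isPrefixOf_iff_prefix]; exact h8)]

theorem Fc_eq_scan : ∀ (n : Nat) (m : List Char), m.length ≤ n →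
    ¬ ("ctrlshift".toList <:+: m) → Fc m = scanHotkey m := by
  intro n
  induction n with
  | zero =>
    intro m hm _
    have : m = [] := List.eq_nil_of_length_eq_zero (Nat.le_zero.mp hm)
    subst this
    simp [Fc, repl_nil, scanHotkey]
  | succ n ih =>
    intro m hm hcs
    cases m with
    | nil => simp [Fc, repl_nil, scanHotkey]
    | cons c t =>
      by_cases k1 : "rshift".toList <+: (c :: t)
      · obtain ⟨u, hu⟩ := k1
        rw [← hu, Fc_rshift, scan_rshift, ih u (by
              have := congrArg List.length hu; simp at this hm; omega)
            (fun hx => hcs (hx.trans ⟨"rshift".toList, [], by rw [List.append_nil]; exact hu⟩))]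
      · by_cases k2 : "lshift".toList <+: (c :: t)
        · obtain ⟨u, hu⟩ := k2
          rw [← hu, Fc_lshift, scan_lshift, ih u (by
                have := congrArg List.length hu; simp at this hm; omega)
              (fun hx => hcs (hx.trans ⟨"lshift".toList, [], by rw [List.append_nil]; exact hu⟩))]
        · by_cases k3 : "cmd".toList <+: (c :: t)
          · obtain ⟨u, hu⟩ := k3
            rw [← hu, Fc_cmd, scan_cmd, ih u (by
                  have := congrArg List.length hu; simp at this hm; omega)
                (fun hx => hcs (hx.trans ⟨"cmd".toList, [], by rw [List.append_nil]; exact hu⟩))]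
          · by_cases k4 : "shift".toList <+: (c :: t)
            · obtain ⟨u, hu⟩ := k4
              rw [← hu, Fc_shift, scan_shift, ih u (by
                    have := congrArg List.length hu; simp at this hm; omega)
                  (fun hx => hcs (hx.trans ⟨"shift".toList, [], by rw [List.append_nil]; exact hu⟩))]
            · by_cases k5 : "alt".toList <+: (c :: t)
              · obtain ⟨u, hu⟩ := k5
                rw [← hu, Fc_alt, scan_alt, ih u (by
                      have := congrArg List.length hu; simp at this hm; omega)
                    (fun hx => hcs (hx.trans ⟨"alt".toList, [], by rw [List.append_nil]; exact hu⟩))]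
              · by_cases k6 : "ctrl".toList <+: (c :: t)
                · obtain ⟨u, hu⟩ := k6
                  have hns : ¬ "shift".toList <+: u := by
                    intro hs
                    obtain ⟨w, hw⟩ := hs
                    exact hcs ⟨[], w, by rw [← hu, ← hw]; simp⟩
                  rw [← hu, Fc_ctrl u hns, scan_ctrl, ih u (by
                        have := congrArg List.length hu; simp at this hm; omega)
                      (fun hx => hcs (hx.trans ⟨"ctrl".toList, [], by rw [List.append_nil]; exact hu⟩))]
                · by_cases k7 : "space".toList <+: (c :: t)
                  · obtain ⟨u, hu⟩ := k7
                    rw [← hu, Fc_space, scan_space, ih u (by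
                          have := congrArg List.length hu; simp at this hm; omega)
                        (fun hx => hcs (hx.trans ⟨"space".toList, [], by rw [List.append_nil]; exact hu⟩))]
                  · by_cases k8 : "+".toList <+: (c :: t)
                    · obtain ⟨u, hu⟩ := k8
                      rw [← hu, Fc_plus, scan_plus, ih u (by
                            have := congrArg List.length hu; simp at this hm; omega)
                          (fun hx => hcs (hx.trans ⟨"+".toList, [], by rw [List.append_nil]; exact hu⟩))]
                      simp
                    · rw [Fc_default c t k1 k2 k3 k4 k5 k6 k7 k8,
                          scan_default c t k1 k2 k3 k4 k5 k6 k7 k8,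
                          ih t (by simp at hm; omega)
                            (fun hx => hcs (hx.trans ⟨[c], [], by simp⟩))]

theorem cs_pass2 (x : List Char) :
    repl "lshift".toList "Left ⇧".toList ("ctrlshift".toList ++ x)
      = "ctrLeft ⇧".toList ++ repl "lshift".toList "Left ⇧".toList x := by
  have e1 : "ctrlshift".toList ++ x = 'c'::'t'::'r'::("lshift".toList ++ x) := by
    rw [show "ctrlshift".toList = ('c'::'t'::'r'::"lshift".toList : List Char) from by decide]
    simp
  have e2 : "lshift".toList = 'l' :: "shift".toList := by decide
  rw [e1]
  rw [repl_cons_neg _ _ _ _ (by rw [e2, List.cons_prefix_cons]; rintro ⟨h1, -⟩; exact absurd h1 (by decide)),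
      repl_cons_neg _ _ _ _ (by rw [e2, List.cons_prefix_cons]; rintro ⟨h1, -⟩; exact absurd h1 (by decide)),
      repl_cons_neg _ _ _ _ (by rw [e2, List.cons_prefix_cons]; rintro ⟨h1, -⟩; exact absurd h1 (by decide)),
      repl_match _ _ _ (by decide)]
  rw [show "ctrLeft ⇧".toList = ('c'::'t'::'r'::"Left ⇧".toList : List Char) from by decide]
  simp

theorem Fc_ctrlshift (w : List Char) :
    Fc ("ctrlshift".toList ++ w) = "ctrLeft ⇧".toList ++ Fc w := by
  unfold Fc
  rw [repl_passthrough "rshift".toList "Right ⇧".toList "ctrlshift".toList _ (by decide)]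
  rw [cs_pass2]
  rw [repl_passthrough "cmd".toList "⌘".toList "ctrLeft ⇧".toList _ (by decide)]
  rw [repl_passthrough "shift".toList "⇧".toList "ctrLeft ⇧".toList _ (by decide)]
  rw [repl_passthrough "alt".toList "⌥".toList "ctrLeft ⇧".toList _ (by decide)]
  rw [repl_passthrough "ctrl".toList "⌃".toList "ctrLeft ⇧".toList _ (by decide)]
  rw [repl_passthrough "space".toList "Space".toList "ctrLeft ⇧".toList _ (by decide)]
  rw [repl_passthrough "+".toList "".toList "ctrLeft ⇧".toList _ (by decide)]

theorem scan_ctrlshift (w : List Char) :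
    scanHotkey ("ctrlshift".toList ++ w) = '⌃'::'⇧':: scanHotkey w := by
  have e : "ctrlshift".toList ++ w = "ctrl".toList ++ ("shift".toList ++ w) := by
    rw [show "ctrlshift".toList = "ctrl".toList ++ "shift".toList from by decide, List.append_assoc]
  rw [e, scan_ctrl, scan_shift]
  rw [show "⌃".toList = (['⌃'] : List Char) from by decide,
      show "⇧".toList = (['⇧'] : List Char) from by decide]
  simp

theorem cs_infix_tail (K u : List Char) (hlen : K.length ≤ 6)
    (hK : ∀ j, j < K.length → ¬ ((K.drop j) <+: "ctrlshift".toList))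
    (hcs : "ctrlshift".toList <:+: K ++ u) : "ctrlshift".toList <:+: u := by
  obtain ⟨s, e, hse⟩ := hcs
  rw [List.append_assoc] at hse
  by_cases h : K.length ≤ s.length
  · have hsK : K <+: s := List.prefix_of_prefix_length_le ⟨u, rfl⟩ ⟨"ctrlshift".toList ++ e, hse⟩ h
    obtain ⟨s', rfl⟩ := hsK
    have h2 : s' ++ ("ctrlshift".toList ++ e) = u := by
      apply List.append_cancel_left (as := K)
      simpa [List.append_assoc] using hse
    exact ⟨s', e, by rw [List.append_assoc]; exact h2⟩
  · have h' : s.length < K.length := Nat.lt_of_not_le h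
    have hsK : s <+: K :=
      List.prefix_of_prefix_length_le ⟨"ctrlshift".toList ++ e, hse⟩ ⟨u, rfl⟩ (le_of_lt h')
    obtain ⟨K', rfl⟩ := hsK
    have h2 : "ctrlshift".toList ++ e = K' ++ u := by
      apply List.append_cancel_left (as := s)
      simpa [List.append_assoc] using hse
    have hK'cs : K' <+: "ctrlshift".toList := by
      apply List.prefix_of_prefix_length_le ⟨u, h2.symm⟩ (List.prefix_append _ _)
      have h6 : (s ++ K').length ≤ 6 := hlen
      have h9 : ("ctrlshift".toList).length = 9 := by decide
      simp at h6
      omega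
    have hj := hK s.length h'
    rw [List.drop_left] at hj
    exact absurd hK'cs hj

theorem cs_infix_tail_ctrl (u : List Char) (hns : ¬ "shift".toList <+: u)
    (hcs : "ctrlshift".toList <:+: "ctrl".toList ++ u) : "ctrlshift".toList <:+: u := by
  obtain ⟨s, e, hse⟩ := hcs
  rw [List.append_assoc] at hse
  by_cases h : ("ctrl".toList).length ≤ s.length
  · have hsK : "ctrl".toList <+: s :=
      List.prefix_of_prefix_length_le ⟨u, rfl⟩ ⟨"ctrlshift".toList ++ e, hse⟩ h
    obtain ⟨s', rfl⟩ := hsK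
    have h2 : s' ++ ("ctrlshift".toList ++ e) = u := by
      apply List.append_cancel_left (as := "ctrl".toList)
      simpa [List.append_assoc] using hse
    exact ⟨s', e, by rw [List.append_assoc]; exact h2⟩
  · have h' : s.length < ("ctrl".toList).length := Nat.lt_of_not_le h
    have hsK : s <+: "ctrl".toList :=
      List.prefix_of_prefix_length_le ⟨"ctrlshift".toList ++ e, hse⟩ ⟨u, rfl⟩ (le_of_lt h')
    obtain ⟨K', hK'⟩ := hsK
    have h2 : "ctrlshift".toList ++ e = K' ++ u := by
      rw [← hK', List.append_assoc] at hse
      exact List.append_cancel_left hse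
    by_cases hs0 : s = []
    · subst hs0
      have hK'' : K' = "ctrl".toList := by simpa using hK'
      subst hK''
      rw [show "ctrlshift".toList = "ctrl".toList ++ "shift".toList from by decide,
          List.append_assoc] at h2
      have h3 : "shift".toList ++ e = u := List.append_cancel_left h2
      exact absurd ⟨e, h3⟩ hns
    · exfalso
      have hK'cs : K' <+: "ctrlshift".toList := by
        apply List.prefix_of_prefix_length_le ⟨u, h2.symm⟩ (List.prefix_append _ _)
        have hl := congrArg List.length hK'
        have h9 : ("ctrlshift".toList).length = 9 := by decide
        have h4 : ("ctrl".toList).length = 4 := by decide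
        simp at hl
        omega
      have hKd : K' = ("ctrl".toList).drop s.length := by
        rw [← hK', List.drop_left]
      have hlen1 : 1 ≤ s.length := by
        cases s with
        | nil => exact absurd rfl hs0
        | cons a b => simp
      have h4 : ("ctrl".toList).length = 4 := by decide
      have hfact : ∀ j, j < 4 → 1 ≤ j → ¬ (("ctrl".toList).drop j <+: "ctrlshift".toList) := by decide
      exact hfact s.length (by omega) hlen1 (hKd ▸ hK'cs)

theorem Fc_ne_scan : ∀ (n : Nat) (m : List Char), m.length ≤ n →
    ("ctrlshift".toList <:+: m) → Fc m ≠ scanHotkey m := by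
  have h9 : ("ctrlshift".toList).length = 9 := by decide
  intro n
  induction n with
  | zero =>
    intro m hm hcs
    have := List.IsInfix.length_le hcs
    omega
  | succ n ih =>
    intro m hm hcs
    cases m with
    | nil =>
      exact absurd (List.IsInfix.length_le hcs) (by decide)
    | cons c t =>
      by_cases k1 : "rshift".toList <+: (c :: t)
      · obtain ⟨u, hu⟩ := k1
        have hcs2 : "ctrlshift".toList <:+: u :=
          cs_infix_tail "rshift".toList u (by decide) (by decide) (hu ▸ hcs)
        rw [← hu, Fc_rshift, scan_rshift]
        intro h
        exact ih u (by have := congrArg List.length hu; simp at this hm; omega) hcs2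
          (List.append_cancel_left h)
      ·
        by_cases k2 : "lshift".toList <+: (c :: t)
        · obtain ⟨u, hu⟩ := k2
          have hcs2 : "ctrlshift".toList <:+: u :=
            cs_infix_tail "lshift".toList u (by decide) (by decide) (hu ▸ hcs)
          rw [← hu, Fc_lshift, scan_lshift]
          intro h
          exact ih u (by have := congrArg List.length hu; simp at this hm; omega) hcs2
            (List.append_cancel_left h)
        ·
          by_cases k3 : "cmd".toList <+: (c :: t)
          · obtain ⟨u, hu⟩ := k3
            have hcs2 : "ctrlshift".toList <:+: u :=
              cs_infix_tail "cmd".toList u (by decide) (by decide) (hu ▸ hcs)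
            rw [← hu, Fc_cmd, scan_cmd]
            intro h
            exact ih u (by have := congrArg List.length hu; simp at this hm; omega) hcs2
              (List.append_cancel_left h)
          ·
            by_cases k4 : "shift".toList <+: (c :: t)
            · obtain ⟨u, hu⟩ := k4
              have hcs2 : "ctrlshift".toList <:+: u :=
                cs_infix_tail "shift".toList u (by decide) (by decide) (hu ▸ hcs)
              rw [← hu, Fc_shift, scan_shift]
              intro h
              exact ih u (by have := congrArg List.length hu; simp at this hm; omega) hcs2
                (List.append_cancel_left h)
            ·
              by_cases k5 : "alt".toList <+: (c :: t)
              · obtain ⟨u, hu⟩ := k5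
                have hcs2 : "ctrlshift".toList <:+: u :=
                  cs_infix_tail "alt".toList u (by decide) (by decide) (hu ▸ hcs)
                rw [← hu, Fc_alt, scan_alt]
                intro h
                exact ih u (by have := congrArg List.length hu; simp at this hm; omega) hcs2
                  (List.append_cancel_left h)
              ·
                by_cases k6 : "ctrl".toList <+: (c :: t)
                · obtain ⟨u, hu⟩ := k6
                  by_cases hsh : "shift".toList <+: u
                  · obtain ⟨w, hw⟩ := hsh
                    rw [← hu, ← hw, show "ctrl".toList ++ ("shift".toList ++ w) = "ctrlshift".toList ++ w from by
                          rw [show "ctrlshift".toList = "ctrl".toList ++ "shift".toList from by decide, List.append_assoc]]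
                    rw [Fc_ctrlshift, scan_ctrlshift]
                    intro h
                    rw [show "ctrLeft ⇧".toList = ('c' :: "trLeft ⇧".toList : List Char) from by decide,
                        List.cons_append] at h
                    injection h with h1 _
                    exact absurd h1 (by decide)
                  · have hcs2 : "ctrlshift".toList <:+: u := cs_infix_tail_ctrl u hsh (hu ▸ hcs)
                    rw [← hu, Fc_ctrl u hsh, scan_ctrl]
                    intro h
                    exact ih u (by have := congrArg List.length hu; simp at this hm; omega) hcs2
                      (List.append_cancel_left h)
                ·
                  by_cases k7 : "space".toList <+: (c :: t)
                  · obtain ⟨u, hu⟩ := k7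
                    have hcs2 : "ctrlshift".toList <:+: u :=
                      cs_infix_tail "space".toList u (by decide) (by decide) (hu ▸ hcs)
                    rw [← hu, Fc_space, scan_space]
                    intro h
                    exact ih u (by have := congrArg List.length hu; simp at this hm; omega) hcs2
                      (List.append_cancel_left h)
                  ·
                    by_cases k8 : "+".toList <+: (c :: t)
                    · obtain ⟨u, hu⟩ := k8
                      have hcs2 : "ctrlshift".toList <:+: u :=
                        cs_infix_tail "+".toList u (by decide) (by decide) (hu ▸ hcs)
                      rw [← hu, Fc_plus, scan_plus]
                      intro h
                      refine ih u (by have := congrArg List.length hu; simp at this hm; omega) hcs2 ?_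
                      rw [show "".toList = ([] : List Char) from rfl, List.nil_append] at h
                      exact h
                    ·
                      obtain ⟨s, e, hse⟩ := hcs
                      cases s with
                      | nil =>
                        exfalso
                        have hpre : "ctrlshift".toList <+: (c :: t) := ⟨e, by simpa using hse⟩
                        exact k6 (List.IsPrefix.trans (by decide : "ctrl".toList <+: "ctrlshift".toList) hpre)
                      | cons c0 s' =>
                        rw [List.append_assoc, List.cons_append] at hse
                        have ht : s' ++ ("ctrlshift".toList ++ e) = t := (List.cons.injEq _ _ _ _).mp hse |>.2
                        have hcs2 : "ctrlshift".toList <:+: t :=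
                          ⟨s', e, by rw [List.append_assoc]; exact ht⟩
                        rw [Fc_default c t k1 k2 k3 k4 k5 k6 k7 k8, scan_default c t k1 k2 k3 k4 k5 k6 k7 k8]
                        intro h
                        injection h with _ h2
                        exact ih t (by simp at hm; omega) hcs2 h2


theorem formatA_toList (hotkey : String) (hne : ¬ hotkey = "") :
    (format_hotkey hotkey).toList = Fc (PySem.Str.lower hotkey).toList := by
  rw [format_hotkey, if_neg hne]
  simp only [List.foldl]
  rw [PySem.Str.toList_replace, PySem.Str.toList_replace, PySem.Str.toList_replace,
      PySem.Str.toList_replace, PySem.Str.toList_replace, PySem.Str.toList_replace,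
      PySem.Str.toList_replace, PySem.Str.toList_replace]
  rw [replace_eq_repl _ _ _ (by decide), replace_eq_repl _ _ _ (by decide),
      replace_eq_repl _ _ _ (by decide), replace_eq_repl _ _ _ (by decide),
      replace_eq_repl _ _ _ (by decide), replace_eq_repl _ _ _ (by decide),
      replace_eq_repl _ _ _ (by decide), replace_eq_repl _ _ _ (by decide)]
  rfl

theorem alt_witness : format_hotkey_alt "ctrlshift" = "⌃⇧" := by
  rw [format_hotkey_alt, if_neg (by decide)]
  have h1 : (PySem.Str.lower "ctrlshift").toList = "ctrl".toList ++ "shift".toList := by decide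
  have h3 : scanHotkey ("shift".toList ++ []) = "⇧".toList ++ scanHotkey [] := scan_shift []
  simp only [List.append_nil] at h3
  rw [h1, scan_ctrl, h3]
  have h4 : scanHotkey [] = [] := by simp [scanHotkey]
  rw [h4]
  decide

-- ===== VERDICT (by name: the statement is the Claim_ definition above) =====
theorem format_hotkey_spec : Claim_unchanged_format_hotkey := by
  intro hotkey _ hnd
  by_cases he : hotkey = ""
  · subst he; rfl
  · have hA := formatA_toList hotkey he
    have hnd2 : ¬ ("ctrlshift".toList <:+: (PySem.Str.lower hotkey).toList) := by
      rw [lower_toList, ← PySem.Chars.isIn_iff_infix]; exact hnd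
    have hs : Fc (PySem.Str.lower hotkey).toList = scanHotkey (PySem.Str.lower hotkey).toList :=
      Fc_eq_scan _ _ le_rfl hnd2
    rw [format_hotkey_alt, if_neg he]
    calc format_hotkey hotkey
        = String.ofList (format_hotkey hotkey).toList := Eq.symm String.ofList_toList
      _ = String.ofList (scanHotkey (PySem.Str.lower hotkey).toList) := by rw [hA, hs]

theorem format_hotkey_changed : Claim_changed_format_hotkey := by
  unfold Claim_changed_format_hotkey
  exact ⟨by decide, by decide, by decide, alt_witness, by decide⟩

theorem format_hotkey_tight : Claim_exact_format_hotkey := by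
  intro hotkey hdom hd
  have hne : hotkey ≠ "" := by
    intro he; subst he; revert hd; decide
  have hinf : "ctrlshift".toList <:+: (PySem.Str.lower hotkey).toList := by
    rw [lower_toList, ← PySem.Chars.isIn_iff_infix]; exact hd
  intro h
  have hA := formatA_toList hotkey hne
  have hB : (format_hotkey_alt hotkey).toList = scanHotkey (PySem.Str.lower hotkey).toList := by
    rw [format_hotkey_alt, if_neg hne, String.toList_ofList]
  have heq : Fc (PySem.Str.lower hotkey).toList = scanHotkey (PySem.Str.lower hotkey).toList := by
    rw [← hA, ← hB, h]
  exact Fc_ne_scan _ _ le_rfl hinf heq
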